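-- pv_equiv track=rewrite | github.com/wooryjoon/algorithms | 프로그래머스/lv1/92334. 신고 결과 받기/신고 결과 받기.py | solution
-- ===== SOURCE A (Python) =====
-- def solution(id_list, report, k):
--     # 신고 무제한 가능
--     # 유저당 한번만 신고 가능
--     # 신고 기준 넘긴 유저는 대상이 되고,
--     # 해당 대상을 신고한 유저에게 알림이 간다.
--     answer = []
--     reportCountMap = {}
--     alarmCountMap = {}
--     for x in id_list :
--         reportCountMap[x] = set() # 키 먼저 부여
--         alarmCountMap[x] = 0
--
--     for x in report : # 신고
--         reporter,reported = x.split(' ')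
--         reportCountMap[reported].add(reporter)
--
--     for x in reportCountMap:
--         if len(reportCountMap[x]) >= k :
--             for e in reportCountMap[x]:
--                 alarmCountMap[e] += 1
--     for x in alarmCountMap:
--         answer.append(alarmCountMap[x])
--     return answer
-- ===== SOURCE B (Python) =====
-- def solution(id_list, report, k):
--     # Deduplicate reports once, then two flat passes over the unique
--     # (reporter, reported) pairs with integer counters -- no per-user
--     # reporter sets and no nested per-group loop.
--     pairs = set()
--     for r in report:
--         reporter, reported = r.split(' ')
--         pairs.add((reporter, reported))
--     count = {x: 0 for x in id_list}
--     for reporter, reported in pairs: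
--         count[reported] += 1
--     alarm = {x: 0 for x in id_list}
--     for reporter, reported in pairs:
--         if count[reported] >= k:
--             alarm[reporter] += 1
--     return list(alarm.values())
-- ===== Notes on version B (the rewrite author's own statement) =====
-- stated objective: alternative
-- what changed: Instead of grouping reporters into a per-user set and walking each qualifying group in a nested loop, B deduplicates the report list once into unique (reporter, reported) pairs and makes two flat passes over them with plain integer counters.
import Mathlib
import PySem

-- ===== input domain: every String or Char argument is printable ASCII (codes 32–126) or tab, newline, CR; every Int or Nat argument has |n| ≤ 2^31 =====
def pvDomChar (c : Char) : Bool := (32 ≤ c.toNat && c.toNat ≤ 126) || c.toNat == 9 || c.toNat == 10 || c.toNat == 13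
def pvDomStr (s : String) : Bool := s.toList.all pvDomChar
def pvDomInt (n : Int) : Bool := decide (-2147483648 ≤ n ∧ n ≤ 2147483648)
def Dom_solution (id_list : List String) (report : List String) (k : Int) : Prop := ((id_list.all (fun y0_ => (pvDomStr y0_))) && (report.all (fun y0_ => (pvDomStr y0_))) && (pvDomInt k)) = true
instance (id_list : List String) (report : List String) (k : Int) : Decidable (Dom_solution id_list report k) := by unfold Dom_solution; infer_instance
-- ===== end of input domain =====

-- B replaces A's per-user reporter sets and nested per-group loop by a dedup of the
-- report list into unique (reporter, reported) pairs and two flat counting passes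
-- over those pairs (objective: alternative decomposition, similar cost).

-- ===== PORT A =====
-- "reporter, reported = x.split(' ')": two fields or none (Python: ValueError)
def solutionSplitPair (x : String) : Option (String × String) :=
  match PySem.Str.split? x " " with
  | some [reporter, reported] => some (reporter, reported)
  | _ => none

-- Where the Python raises (ValueError on a report without exactly two fields,
-- KeyError on an id outside id_list) the port takes the harmless default branch;
-- exactly those inputs are excluded by Pre_solution.
def solution (id_list : List String) (report : List String) (k : Int) : List Int :=
  let maps := id_list.foldl
    (fun (m : PySem.Dict String (PySem.Set String) × PySem.Dict String Int) x =>
      (m.1.insert x PySem.Set.empty, m.2.insert x 0))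
    (PySem.Dict.empty, PySem.Dict.empty)
  let rcm := report.foldl
    (fun d x =>
      match solutionSplitPair x with
      | some (reporter, reported) =>
          d.modify reported PySem.Set.empty (fun s => PySem.Set.add s reporter)
      | none => d)
    maps.1
  let acm := rcm.keys.foldl
    (fun a x =>
      if k ≤ PySem.Set.len (rcm.getD x PySem.Set.empty) then
        (rcm.getD x PySem.Set.empty).foldl (fun a e => a.modify e 0 (· + 1)) a
      else a)
    maps.2
  acm.values

-- ===== PORT B =====
-- "reporter, reported = r.split(' ')" in B's dedup pass
def solutionAltSplitPair (r : String) : Option (String × String) :=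
  match PySem.Str.split? r " " with
  | some [reporter, reported] => some (reporter, reported)
  | _ => none

def solution_alt (id_list : List String) (report : List String) (k : Int) : List Int :=
  let pairs : PySem.Set (String × String) := report.foldl
    (fun s r =>
      match solutionAltSplitPair r with
      | some p => PySem.Set.add s p
      | none => s)
    PySem.Set.empty
  let cnt := pairs.foldl (fun d p => d.modify p.2 0 (· + 1))
    (id_list.foldl (fun (d : PySem.Dict String Int) x => d.insert x 0) PySem.Dict.empty)
  let alarm := pairs.foldl
    (fun d p => if k ≤ cnt.getD p.2 0 then d.modify p.1 0 (· + 1) else d)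
    (id_list.foldl (fun (d : PySem.Dict String Int) x => d.insert x 0) PySem.Dict.empty)
  alarm.values

-- ===== PRECONDITION & SPEC =====
-- r.split(' ') as a (reporter, reported) pair, if it has exactly two fields.
def pvParse (r : String) : Option (String × String) :=
  match PySem.Str.split? r " " with
  | some [a, b] => some (a, b)
  | _ => none

-- the distinct reporters of user b occurring in report
def pvReporters (report : List String) (b : String) : List String :=
  PySem.List.dedup (((report.filterMap pvParse).filter (fun p => p.2 == b)).map (·.1))

-- Pre_solution excludes exactly the inputs on which the Python A raises: a report
-- entry without exactly two space-separated fields (ValueError), a reported id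
-- outside id_list (KeyError), or a reporter outside id_list whose target reaches
-- the threshold k (KeyError on the alarm increment). B raises there as well.
def Pre_solution (id_list : List String) (report : List String) (k : Int) : Prop :=
  ∀ r ∈ report, ∃ p ∈ (pvParse r).toList,
    p.2 ∈ id_list ∧ (p.1 ∈ id_list ∨ ((pvReporters report p.2).length : Int) < k)
instance (id_list : List String) (report : List String) (k : Int) : Decidable (Pre_solution id_list report k) := by unfold Pre_solution; infer_instance

def pvWitness_solution : List String × List String × Int :=
  (["muzi", "frodo", "apeach"], ["muzi frodo", "apeach frodo", "muzi apeach"], 2)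

def Spec_solution (id_list : List String) (report : List String) (k : Int) (out : List Int) : Prop := out = solution_alt id_list report k
instance (id_list : List String) (report : List String) (k : Int) (out : List Int) : Decidable (Spec_solution id_list report k out) := by unfold Spec_solution; infer_instance

-- ===== CLAIM (what is proved, stated in full; the proofs are below) =====
def Claim_equal_solution : Prop := ∀ (id_list : List String) (report : List String) (k : Int), Dom_solution id_list report k → Pre_solution id_list report k → Spec_solution id_list report k (solution id_list report k)


-- ===== LEMMAS AND PROOFS =====

-- the parsed (reporter, reported) pairs of the report list
def pvPairs (report : List String) : List (String × String) := report.filterMap pvParse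

theorem solutionSplitPair_eq (x : String) : solutionSplitPair x = pvParse x := rfl

theorem solutionAltSplitPair_eq (x : String) : solutionAltSplitPair x = pvParse x := rfl

-- A's report loop, rewritten over the parsed pair list (unparsable entries are no-ops)
theorem foldA_parse (report : List String) (d : PySem.Dict String (PySem.Set String)) :
    report.foldl (fun d x =>
      match solutionSplitPair x with
      | some (reporter, reported) =>
          d.modify reported PySem.Set.empty (fun s => PySem.Set.add s reporter)
      | none => d) d
    = (pvPairs report).foldl
        (fun d p => d.modify p.2 PySem.Set.empty (fun s => PySem.Set.add s p.1)) d := by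
  induction report generalizing d with
  | nil => rfl
  | cons r rs ih =>
    simp only [List.foldl_cons, pvPairs, List.filterMap_cons, ← solutionSplitPair_eq]
    rcases h : solutionSplitPair r with _ | ⟨a, b⟩ <;>
      simp only [List.foldl_cons] <;> exact ih _

-- B's report loop builds exactly the set of parsed pairs
theorem foldB_parse (report : List String) (s : PySem.Set (String × String)) :
    report.foldl (fun s r =>
      match solutionAltSplitPair r with
      | some p => PySem.Set.add s p
      | none => s) s
    = PySem.Set.update s (pvPairs report) := by
  induction report generalizing s with
  | nil => rfl
  | cons r rs ih =>
    simp only [List.foldl_cons, pvPairs, List.filterMap_cons, ← solutionAltSplitPair_eq]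
    rcases h : solutionAltSplitPair r with _ | p <;>
      · simp only [PySem.Set.update_cons]
        exact ih _

-- a fold inserting a constant value keeps a constant lookup
theorem getD_foldl_insert_const {ν : Type} (c : ν) (xs : List String)
    (d : PySem.Dict String ν) (y : String) (h : d.getD y c = c) :
    (xs.foldl (fun d x => d.insert x c) d).getD y c = c := by
  induction xs generalizing d with
  | nil => exact h
  | cons x xs ih =>
    simp only [List.foldl_cons]
    exact ih _ (by rw [PySem.Dict.getD_insert]; split <;> simp [h])

-- value of A's grouping dict at any key
theorem getD_foldA (L : List (String × String)) (d : PySem.Dict String (PySem.Set String)) (b : String) :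
    (L.foldl (fun d p => d.modify p.2 PySem.Set.empty (fun s => PySem.Set.add s p.1)) d).getD b PySem.Set.empty
    = PySem.Set.update (d.getD b PySem.Set.empty) ((L.filter (fun p => p.2 == b)).map (·.1)) := by
  induction L generalizing d with
  | nil => rfl
  | cons p L ih =>
    simp only [List.foldl_cons, List.filter_cons]
    rw [ih]
    by_cases h : p.2 = b
    · simp only [h, beq_self_eq_true, if_pos, List.map_cons, PySem.Set.update_cons,
        PySem.Dict.getD_modify]
    · have hb : (p.2 == b) = false := by simp [h]
      rw [hb]
      simp only [if_false, Bool.false_eq_true]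
      rw [PySem.Dict.getD_modify]
      rw [if_neg (fun hc => h hc.symm)]

theorem update_of_subset {a : Type} [BEq a] [LawfulBEq a] (s : PySem.Set a) (xs : List a)
    (h : ∀ x ∈ xs, x ∈ s) : PySem.Set.update s xs = s := by
  rw [PySem.Set.update_eq_append_filter]
  have h2 : (PySem.Set.ofList xs).filter (fun y => !(PySem.Set.contains s y)) = [] := by
    apply List.filter_eq_nil_iff.mpr
    intro x hx
    have hxs : x ∈ s := h x ((PySem.Set.mem_ofList xs x).mp hx)
    simpa using hxs
  rw [h2, List.append_nil]

-- keys are preserved by A's alarm loop when every touched id is a key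
theorem keys_foldA_alarm (keysL : List String) (S : String → PySem.Set String) (k : Int)
    (a : PySem.Dict String Int)
    (h : ∀ x ∈ keysL, k ≤ PySem.Set.len (S x) → ∀ e ∈ S x, e ∈ a.keys) :
    (keysL.foldl (fun a x =>
      if k ≤ PySem.Set.len (S x) then
        (S x).foldl (fun a e => a.modify e 0 (· + 1)) a
      else a) a).keys = a.keys := by
  induction keysL generalizing a with
  | nil => rfl
  | cons x xs ih =>
    simp only [List.foldl_cons]
    by_cases hc : k ≤ PySem.Set.len (S x)
    · rw [if_pos hc]
      have hkeys : ((S x).foldl (fun a e => a.modify e 0 (· + 1)) a).keys = a.keys := by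
        rw [PySem.Dict.keys_foldl_modify (S x) 0 (fun _ _ v => v + 1) a]
        exact update_of_subset _ _ (fun e he => h x (by simp) hc e he)
      rw [ih, hkeys]
      intro x' hx' hc' e he
      rw [hkeys]
      exact h x' (by simp [hx']) hc' e he
    · rw [if_neg hc, ih]
      intro x' hx' hc' e he
      exact h x' (by simp [hx']) hc' e he

-- value of A's alarm dict at any key
theorem getD_foldA_alarm (keysL : List String) (S : String → PySem.Set String) (k : Int)
    (a : PySem.Dict String Int) (y : String) :
    (keysL.foldl (fun a x =>
      if k ≤ PySem.Set.len (S x) then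
        (S x).foldl (fun a e => a.modify e 0 (· + 1)) a
      else a) a).getD y 0
    = a.getD y 0 + (keysL.map (fun x =>
        if k ≤ PySem.Set.len (S x) then ((S x).count y : Int) else 0)).sum := by
  induction keysL generalizing a with
  | nil => simp
  | cons x xs ih =>
    simp only [List.foldl_cons, List.map_cons, List.sum_cons]
    by_cases hc : k ≤ PySem.Set.len (S x)
    · rw [if_pos hc, if_pos hc, ih, PySem.Dict.getD_foldl_modify_add_one]
      ring
    · rw [if_neg hc, if_neg hc, ih]
      ring

-- a guarded fold is a fold over the filtered list
theorem foldl_ite_filter {a b : Type} (c : a → Prop) [DecidablePred c]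
    (g : b → a → b) (l : List a) (init : b) :
    l.foldl (fun d x => if c x then g d x else d) init
    = (l.filter (fun x => decide (c x))).foldl g init := by
  induction l generalizing init with
  | nil => rfl
  | cons x xs ih =>
    simp only [List.foldl_cons, List.filter_cons]
    by_cases h : c x
    · rw [if_pos h, ih, if_pos (by simp [h]), List.foldl_cons]
    · rw [if_neg h, ih, if_neg (by simp [h])]

-- a sum of guarded ones is a count
theorem sum_ite_eq_countP {a : Type} (p : a → Prop) [DecidablePred p] (l : List a) :
    (l.map (fun x => if p x then (1 : Int) else 0)).sum = (l.countP (fun x => decide (p x)) : Int) := by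
  induction l with
  | nil => rfl
  | cons x xs ih =>
    simp only [List.map_cons, List.sum_cons, List.countP_cons, ih]
    by_cases h : p x
    · simp [h]
      omega
    · simp [h]

-- distinct pairs with a fixed second component are counted by their distinct first components
theorem count_snd_ofList (L : List (String × String)) (b : String) :
    ((PySem.Set.ofList L).filter (fun p => p.2 == b)).length
    = (PySem.Set.ofList ((L.filter (fun p => p.2 == b)).map (·.1))).length := by
  induction L using List.reverseRecOn with
  | nil => rfl
  | append_singleton M p ih =>
    rw [PySem.Set.ofList_append_singleton, List.filter_append, List.map_append]
    by_cases hb : p.2 = b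
    · have hfb : List.filter (fun q => q.2 == b) [p] = [p] := by simp [hb]
      rw [hfb, List.map_cons, List.map_nil, PySem.Set.ofList_append_singleton]
      by_cases hm : p ∈ M
      · have h1 : (PySem.Set.ofList M).add p = PySem.Set.ofList M :=
          PySem.Set.add_of_mem ((PySem.Set.mem_ofList M p).mpr hm)
        have hp1 : p.1 ∈ (M.filter (fun q => q.2 == b)).map (·.1) :=
          List.mem_map.mpr ⟨p, List.mem_filter.mpr ⟨hm, by simp [hb]⟩, rfl⟩
        have h2 : (PySem.Set.ofList ((M.filter (fun q => q.2 == b)).map (·.1))).add p.1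
            = PySem.Set.ofList ((M.filter (fun q => q.2 == b)).map (·.1)) :=
          PySem.Set.add_of_mem ((PySem.Set.mem_ofList _ _).mpr hp1)
        rw [h1, h2]
        exact ih
      · have h1 : (PySem.Set.ofList M).add p = PySem.Set.ofList M ++ [p] :=
          PySem.Set.add_of_not_mem (fun hc => hm ((PySem.Set.mem_ofList M p).mp hc))
        have hp1 : p.1 ∉ (M.filter (fun q => q.2 == b)).map (·.1) := by
          intro hc
          obtain ⟨q, hq, hq1⟩ := List.mem_map.mp hc
          obtain ⟨hqM, hq2⟩ := List.mem_filter.mp hq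
          have : q = p := by
            have h2 : q.2 = p.2 := by rw [hb]; exact beq_iff_eq.mp hq2
            exact Prod.ext hq1 h2
          exact hm (this ▸ hqM)
        have h2 : (PySem.Set.ofList ((M.filter (fun q => q.2 == b)).map (·.1))).add p.1
            = PySem.Set.ofList ((M.filter (fun q => q.2 == b)).map (·.1)) ++ [p.1] :=
          PySem.Set.add_of_not_mem (fun hc => hp1 ((PySem.Set.mem_ofList _ _).mp hc))
        rw [h1, h2, List.filter_append, hfb, List.length_append, List.length_append, ih]
        simp
    · have hfb : List.filter (fun q => q.2 == b) [p] = [] := by simp [hb]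
      rw [hfb, List.map_nil, List.append_nil]
      by_cases hm : p ∈ M
      · rw [PySem.Set.add_of_mem ((PySem.Set.mem_ofList M p).mpr hm)]
        exact ih
      · rw [PySem.Set.add_of_not_mem (fun hc => hm ((PySem.Set.mem_ofList M p).mp hc)),
          List.filter_append, hfb, List.append_nil]
        exact ih

-- the count-of-pairs form of the previous lemma
theorem count_snd_dedup' (L : List (String × String)) (b : String) :
    ((PySem.List.dedup L).map (·.2)).count b
    = (PySem.List.dedup ((L.filter (fun p => p.2 == b)).map (·.1))).length := by
  rw [List.count_eq_countP, List.countP_map, PySem.List.dedup_eq_ofList, PySem.List.dedup_eq_ofList]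
  have hcomp : ((fun x => x == b) ∘ (fun p : String × String => p.2)) = fun p : String × String => p.2 == b := rfl
  rw [hcomp, List.countP_eq_length_filter]
  exact count_snd_ofList L b

-- the central bijection: counting qualifying targets of y over the id list
-- equals counting qualifying distinct pairs with first component y
theorem countP_bij (y : String) (I : List String) (Q : List (String × String))
    (cond : String → Prop) [DecidablePred cond]
    (hI : I.Nodup) (hQ : Q.Nodup) (hsub : ∀ p ∈ Q, p.2 ∈ I) :
    I.countP (fun x => decide (cond x ∧ (y, x) ∈ Q))
    = Q.countP (fun p => decide (cond p.2 ∧ p.1 = y)) := by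
  rw [List.countP_eq_length_filter, List.countP_eq_length_filter]
  rw [← List.toFinset_card_of_nodup (hI.filter _), ← List.toFinset_card_of_nodup (hQ.filter _)]
  apply Finset.card_bij (i := fun x _ => (y, x))
  · intro x hx
    simp only [List.mem_toFinset, List.mem_filter, decide_eq_true_eq] at hx ⊢
    exact ⟨hx.2.2, hx.2.1, trivial⟩
  · intro x1 h1 x2 h2 he
    simpa using he
  · intro p hp
    simp only [List.mem_toFinset, List.mem_filter, decide_eq_true_eq] at hp
    obtain ⟨hpQ, hcond, hpy⟩ := hp
    have hpe : (y, p.2) = p := by rw [← hpy]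
    refine ⟨p.2, ?_, hpe⟩
    simp only [List.mem_toFinset, List.mem_filter, decide_eq_true_eq]
    exact ⟨hsub p hpQ, hcond, hpe ▸ hpQ⟩

-- membership in the distinct-reporter list is membership of the pair in the pair set
theorem mem_reporters_iff (report : List String) (x y : String) :
    y ∈ pvReporters report x ↔ (y, x) ∈ PySem.Set.ofList (pvPairs report) := by
  rw [pvReporters, PySem.List.mem_dedup, PySem.Set.mem_ofList]
  constructor
  · intro h
    obtain ⟨p, hp, hp1⟩ := List.mem_map.mp h
    obtain ⟨hpL, hp2⟩ := List.mem_filter.mp hp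
    obtain ⟨a, b⟩ := p
    simp only [beq_iff_eq] at hp2
    dsimp only at hp1
    subst hp1
    subst hp2
    exact hpL
  · intro h
    exact List.mem_map.mpr ⟨(y, x), List.mem_filter.mpr ⟨h, by simp⟩, rfl⟩

-- the Pre_ hypothesis, in parsed-pair form
theorem hL_of_pre (id_list report : List String) (k : Int)
    (hpre : Pre_solution id_list report k) :
    ∀ p ∈ pvPairs report, p.2 ∈ id_list ∧
      (p.1 ∈ id_list ∨ ((pvReporters report p.2).length : Int) < k) := by
  intro p hp
  obtain ⟨r, hr, hpr⟩ := List.mem_filterMap.mp hp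
  obtain ⟨q, hq, hq2⟩ := hpre r hr
  rw [hpr] at hq
  simp only [Option.toList_some, List.mem_singleton] at hq
  exact hq ▸ hq2

-- A computes, for each distinct id y in order, the number of distinct ids x
-- reaching the threshold that y reported
theorem solutionA_eq (id_list report : List String) (k : Int)
    (hL : ∀ p ∈ pvPairs report, p.2 ∈ id_list ∧
      (p.1 ∈ id_list ∨ ((pvReporters report p.2).length : Int) < k)) :
    solution id_list report k = (PySem.Set.ofList id_list).map (fun y =>
      (((PySem.Set.ofList id_list).countP (fun x =>
        decide (k ≤ ((pvReporters report x).length : Int) ∧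
          (y, x) ∈ PySem.Set.ofList (pvPairs report)))) : Int)) := by
  have hsplit : id_list.foldl
      (fun (m : PySem.Dict String (PySem.Set String) × PySem.Dict String Int) x =>
        (m.1.insert x PySem.Set.empty, m.2.insert x 0))
      (PySem.Dict.empty, PySem.Dict.empty)
      = (id_list.foldl (fun d x => d.insert x PySem.Set.empty) PySem.Dict.empty,
         id_list.foldl (fun d x => d.insert x (0 : Int)) PySem.Dict.empty) :=
    PySem.List.foldl_prod_mk (fun d x => d.insert x PySem.Set.empty)
      (fun d x => d.insert x (0 : Int)) id_list PySem.Dict.empty PySem.Dict.empty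
  simp only [solution]
  rw [hsplit]
  dsimp only
  rw [foldA_parse]
  set rcm0 : PySem.Dict String (PySem.Set String) :=
    id_list.foldl (fun d x => d.insert x PySem.Set.empty) PySem.Dict.empty with hrcm0def
  set acm0 : PySem.Dict String Int :=
    id_list.foldl (fun d x => d.insert x (0 : Int)) PySem.Dict.empty with hacm0def
  set rcm := (pvPairs report).foldl
    (fun d p => d.modify p.2 PySem.Set.empty (fun s => PySem.Set.add s p.1)) rcm0 with hrcmdef
  have hrcm0getD : ∀ b, rcm0.getD b PySem.Set.empty = PySem.Set.empty := fun b =>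
    getD_foldl_insert_const PySem.Set.empty id_list PySem.Dict.empty b
      (PySem.Dict.getD_empty b PySem.Set.empty)
  have hacm0getD : ∀ y, acm0.getD y 0 = 0 := fun y =>
    getD_foldl_insert_const 0 id_list PySem.Dict.empty y (PySem.Dict.getD_empty y 0)
  have hupd : ∀ l : List String,
      PySem.Set.update (PySem.Set.empty : PySem.Set String) l = PySem.Set.ofList l :=
    fun l => PySem.Set.update_nil_left l
  have hS : ∀ b, rcm.getD b PySem.Set.empty = pvReporters report b := by
    intro b
    rw [hrcmdef, getD_foldA, hrcm0getD b, hupd]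
    rw [pvReporters, PySem.List.dedup_eq_ofList, pvPairs]
  have hkeysrcm0 : rcm0.keys = PySem.Set.ofList id_list := by
    have h : rcm0.keys = PySem.Set.update (PySem.Dict.empty :
        PySem.Dict String (PySem.Set String)).keys id_list :=
      PySem.Dict.keys_foldl_insert id_list (fun _ _ => PySem.Set.empty) PySem.Dict.empty
    rw [h, PySem.Dict.keys_empty]
    exact PySem.Set.update_nil_left id_list
  have hkeysacm0 : acm0.keys = PySem.Set.ofList id_list := by
    have h : acm0.keys = PySem.Set.update (PySem.Dict.empty :
        PySem.Dict String Int).keys id_list :=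
      PySem.Dict.keys_foldl_insert id_list (fun _ _ => (0 : Int)) PySem.Dict.empty
    rw [h, PySem.Dict.keys_empty]
    exact PySem.Set.update_nil_left id_list
  have hkeysrcm : rcm.keys = PySem.Set.ofList id_list := by
    have h : rcm.keys = PySem.Set.update rcm0.keys ((pvPairs report).map (fun p => p.2)) :=
      PySem.Dict.keys_foldl_modify_key (pvPairs report) (fun p => p.2) PySem.Set.empty
        (fun _ p s => PySem.Set.add s p.1) rcm0
    rw [h, hkeysrcm0]
    apply update_of_subset
    intro b hb
    obtain ⟨p, hp, hpb⟩ := List.mem_map.mp hb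
    exact (PySem.Set.mem_ofList _ _).mpr (hpb ▸ (hL p hp).1)
  have hlen : ∀ b, PySem.Set.len (pvReporters report b) = ((pvReporters report b).length : Int) :=
    fun b => rfl
  have htouch : ∀ x ∈ rcm.keys, k ≤ PySem.Set.len (rcm.getD x PySem.Set.empty) →
      ∀ e ∈ rcm.getD x PySem.Set.empty, e ∈ acm0.keys := by
    intro x _ hc e he
    rw [hS x] at hc he
    rw [pvReporters] at he
    obtain ⟨p, hp, hp1⟩ := List.mem_map.mp ((PySem.List.mem_dedup _ _).mp he)
    obtain ⟨hpL, hp2⟩ := List.mem_filter.mp hp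
    rcases (hL p (by rwa [pvPairs])).2 with hin | hlt
    · rw [hkeysacm0]
      exact (PySem.Set.mem_ofList _ _).mpr (hp1 ▸ hin)
    · exfalso
      rw [hlen x] at hc
      rw [beq_iff_eq.mp hp2] at hlt
      omega
  have hkeysacm : (rcm.keys.foldl
      (fun a x =>
        if k ≤ PySem.Set.len (rcm.getD x PySem.Set.empty) then
          (rcm.getD x PySem.Set.empty).foldl (fun a e => a.modify e 0 (· + 1)) a
        else a) acm0).keys = acm0.keys :=
    keys_foldA_alarm rcm.keys (fun x => rcm.getD x PySem.Set.empty) k acm0 htouch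
  rw [PySem.Dict.values_eq_map_keys _ (by
      rw [hkeysacm, hkeysacm0]; exact PySem.Set.nodup_ofList id_list) 0]
  rw [hkeysacm, hkeysacm0]
  apply List.map_congr_left
  intro y _
  rw [getD_foldA_alarm rcm.keys (fun x => rcm.getD x PySem.Set.empty) k acm0 y,
    hacm0getD y, zero_add, hkeysrcm]
  have hterm : ∀ x ∈ PySem.Set.ofList id_list,
      (if k ≤ PySem.Set.len (rcm.getD x PySem.Set.empty)
        then ((rcm.getD x PySem.Set.empty).count y : Int) else 0)
      = (if k ≤ ((pvReporters report x).length : Int) ∧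
          (y, x) ∈ PySem.Set.ofList (pvPairs report) then (1 : Int) else 0) := by
    intro x _
    rw [hS x, hlen x]
    by_cases hc : k ≤ ((pvReporters report x).length : Int)
    · rw [if_pos hc]
      by_cases hm : (y, x) ∈ PySem.Set.ofList (pvPairs report)
      · rw [if_pos ⟨hc, hm⟩]
        rw [List.count_eq_one_of_mem
          (by rw [pvReporters]; exact PySem.List.nodup_dedup _)
          ((mem_reporters_iff report x y).mpr hm)]
        norm_num
      · rw [if_neg (fun h => hm h.2)]
        rw [List.count_eq_zero.mpr (fun h => hm ((mem_reporters_iff report x y).mp h))]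
        norm_num
    · rw [if_neg hc, if_neg (fun h => hc h.1)]
  rw [List.map_congr_left hterm, sum_ite_eq_countP]

-- B computes, for each distinct id y in order, the number of distinct pairs (y, x)
-- whose target x reaches the threshold
set_option maxHeartbeats 1000000 in
theorem solutionB_eq (id_list report : List String) (k : Int)
    (hL : ∀ p ∈ pvPairs report, p.2 ∈ id_list ∧
      (p.1 ∈ id_list ∨ ((pvReporters report p.2).length : Int) < k)) :
    solution_alt id_list report k = (PySem.Set.ofList id_list).map (fun y =>
      (((PySem.Set.ofList (pvPairs report)).countP (fun p =>
        decide (k ≤ ((pvReporters report p.2).length : Int) ∧ p.1 = y))) : Int)) := by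
  simp only [solution_alt]
  rw [foldB_parse]
  have hupd : PySem.Set.update (PySem.Set.empty : PySem.Set (String × String)) (pvPairs report)
      = PySem.Set.ofList (pvPairs report) := PySem.Set.update_nil_left _
  rw [hupd]
  set z0 : PySem.Dict String Int :=
    id_list.foldl (fun d x => d.insert x (0 : Int)) PySem.Dict.empty with hz0def
  set cnt := (PySem.Set.ofList (pvPairs report)).foldl
    (fun d p => d.modify p.2 0 (· + 1)) z0 with hcntdef
  have hz0getD : ∀ b, z0.getD b 0 = 0 := fun b =>
    getD_foldl_insert_const 0 id_list PySem.Dict.empty b (PySem.Dict.getD_empty b 0)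
  have hkeysz0 : z0.keys = PySem.Set.ofList id_list := by
    have h : z0.keys = PySem.Set.update (PySem.Dict.empty :
        PySem.Dict String Int).keys id_list :=
      PySem.Dict.keys_foldl_insert id_list (fun _ _ => (0 : Int)) PySem.Dict.empty
    rw [h, PySem.Dict.keys_empty]
    exact PySem.Set.update_nil_left id_list
  have hcnt : ∀ b, cnt.getD b 0 = ((pvReporters report b).length : Int) := by
    intro b
    have h1 : cnt = ((PySem.Set.ofList (pvPairs report)).map (fun p => p.2)).foldl
        (fun d x => d.modify x 0 (· + 1)) z0 :=
      (List.foldl_map (f := fun p : String × String => p.2)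
        (g := fun d x => PySem.Dict.modify d x 0 (· + 1))).symm
    rw [h1, PySem.Dict.getD_foldl_modify_add_one, hz0getD b, zero_add]
    have h2 := count_snd_dedup' (pvPairs report) b
    rw [PySem.List.dedup_eq_ofList] at h2
    rw [h2, pvReporters, pvPairs]
  have hif : (PySem.Set.ofList (pvPairs report)).foldl
      (fun d p => if k ≤ cnt.getD p.2 0 then d.modify p.1 0 (· + 1) else d) z0
      = ((PySem.Set.ofList (pvPairs report)).filter
          (fun p => decide (k ≤ cnt.getD p.2 0))).foldl
          (fun d p => d.modify p.1 0 (· + 1)) z0 :=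
    foldl_ite_filter (fun p : String × String => k ≤ cnt.getD p.2 0)
      (fun (d : PySem.Dict String Int) (p : String × String) =>
        PySem.Dict.modify d p.1 0 (· + 1)) (PySem.Set.ofList (pvPairs report)) z0
  rw [hif]
  have hfpred : ((PySem.Set.ofList (pvPairs report)).filter
      (fun p => decide (k ≤ cnt.getD p.2 0)))
      = ((PySem.Set.ofList (pvPairs report)).filter
      (fun p => decide (k ≤ ((pvReporters report p.2).length : Int)))) := by
    apply List.filter_congr
    intro p _
    rw [hcnt p.2]
  rw [hfpred]
  set Qf := (PySem.Set.ofList (pvPairs report)).filter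
    (fun p => decide (k ≤ ((pvReporters report p.2).length : Int))) with hQfdef
  have hkeysal : ((Qf.foldl (fun d p => d.modify p.1 0 (· + 1)) z0)).keys = z0.keys := by
    have h : (Qf.foldl (fun d p => d.modify p.1 0 (· + 1)) z0).keys
        = PySem.Set.update z0.keys (Qf.map (fun p => p.1)) :=
      PySem.Dict.keys_foldl_modify_key Qf (fun p => p.1) 0 (fun _ _ v => v + 1) z0
    rw [h, hkeysz0]
    apply update_of_subset
    intro e he
    obtain ⟨p, hp, hpe⟩ := List.mem_map.mp he
    rw [hQfdef] at hp
    obtain ⟨hpQ, hpc⟩ := List.mem_filter.mp hp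
    rcases (hL p ((PySem.Set.mem_ofList _ _).mp hpQ)).2 with hin | hlt
    · exact (PySem.Set.mem_ofList _ _).mpr (hpe ▸ hin)
    · exfalso
      simp only [decide_eq_true_eq] at hpc
      omega
  rw [PySem.Dict.values_eq_map_keys _ (by
      rw [hkeysal, hkeysz0]; exact PySem.Set.nodup_ofList id_list) 0]
  rw [hkeysal, hkeysz0]
  apply List.map_congr_left
  intro y _
  have h1 : Qf.foldl (fun d p => d.modify p.1 0 (· + 1)) z0
      = (Qf.map (fun p => p.1)).foldl (fun d x => d.modify x 0 (· + 1)) z0 :=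
    (List.foldl_map (f := fun p : String × String => p.1)
      (g := fun d x => PySem.Dict.modify d x 0 (· + 1))).symm
  rw [h1, PySem.Dict.getD_foldl_modify_add_one, hz0getD y, zero_add]
  rw [List.count_eq_countP, List.countP_map, hQfdef, List.countP_filter]
  congr 1
  apply List.countP_congr
  intro p _
  simp only [Function.comp, beq_iff_eq, Bool.and_eq_true, decide_eq_true_eq]
  constructor
  · rintro ⟨h1, h2⟩; exact ⟨h2, h1⟩
  · rintro ⟨h1, h2⟩; exact ⟨h2, h1⟩

-- ===== VERDICT (by name: the statement is the Claim_ definition above) =====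
theorem solution_spec : Claim_equal_solution := by
  intro id_list report k _ hpre
  unfold Spec_solution
  have hL := hL_of_pre id_list report k hpre
  rw [solutionA_eq id_list report k hL, solutionB_eq id_list report k hL]
  apply List.map_congr_left
  intro y _
  have h := countP_bij y (PySem.Set.ofList id_list) (PySem.Set.ofList (pvPairs report))
    (fun x => k ≤ ((pvReporters report x).length : Int))
    (PySem.Set.nodup_ofList id_list) (PySem.Set.nodup_ofList (pvPairs report))
    (fun p hp => (PySem.Set.mem_ofList _ _).mpr
      (hL p ((PySem.Set.mem_ofList _ _).mp hp)).1)
  exact congrArg (fun n : Nat => (n : Int)) h
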